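-- pv_equiv track=rewrite | github.com/EliPreston/ClassFiles | W2022/CPS 109/Final Exam Practice/7.py | marketResearch
-- ===== SOURCE A (Python) =====
-- def marketResearch(carts):
--
--     items = {}
--     for l in carts:
--         for item in l:
--             if item in items.keys():
--                 items[item] += 1
--             else:
--                 items[item] = 1
--     s = sorted(items.items(), key = lambda x: x[1], reverse=True)
--     mostCommon = s[0][0]
--
--     items2 = {}
--     for l in carts:
--         if mostCommon in l:
--             for item in l:
--                 if item in items2.keys():
--                     items2[item] += 1
--                 else:
--                     items2[item] = 1
--         else:
--             pass
--     s2 = sorted(items2.items(), key = lambda x: x[1], reverse=True)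
--     mostCommon2 = s2[1][0]
--     out = (mostCommon, mostCommon2)
--
--     return out
-- ===== SOURCE B (Python) =====
-- def marketResearch(carts):
--     def count(seq):
--         c = {}
--         for x in seq:
--             c[x] = c.get(x, 0) + 1
--         return c
--     c1 = count(x for cart in carts for x in cart)
--     most = max(c1, key=c1.get)
--     c2 = count(x for cart in carts if most in cart for x in cart)
--     best = second = None
--     for kv in c2.items():
--         if best is None or kv[1] > best[1]:
--             best, second = kv, best
--         elif second is None or kv[1] > second[1]:
--             second = kv
--     return (most, second[0])
-- ===== Notes on version B (the rewrite author's own statement) =====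
-- stated objective: alternative
-- what changed: Replaces A's membership-checked dict building and the two full sorts of the count dicts by one-pass dict.get counting over a flattened stream, a single max() for the top item and a linear top-2 scan for the runner-up (trades the sorts for selection scans; not measurably faster on the probe's inputs).
import Mathlib
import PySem

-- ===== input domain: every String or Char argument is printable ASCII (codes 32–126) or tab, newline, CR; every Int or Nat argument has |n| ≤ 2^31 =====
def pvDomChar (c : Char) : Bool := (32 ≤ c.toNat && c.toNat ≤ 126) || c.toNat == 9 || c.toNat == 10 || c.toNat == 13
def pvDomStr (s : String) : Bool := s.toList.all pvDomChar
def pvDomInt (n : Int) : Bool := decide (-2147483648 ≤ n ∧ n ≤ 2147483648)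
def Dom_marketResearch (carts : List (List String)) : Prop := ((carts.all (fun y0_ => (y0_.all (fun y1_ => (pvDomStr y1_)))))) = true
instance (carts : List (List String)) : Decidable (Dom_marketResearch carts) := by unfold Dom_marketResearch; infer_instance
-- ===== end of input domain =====

-- B replaces A's two membership-checked counting loops and two full sorts by one-pass
-- counting plus a linear first-max / top-2 scan over the counts (selection instead of sorting).

-- ===== PORT A =====
-- A's counting step: 'if item in items.keys(): items[item] += 1 else: items[item] = 1'
-- (items[item] is d.getD item 0 here, exact because the branch guarantees the key is present)
def marketResearchStep (d : PySem.Dict String Int) (item : String) : PySem.Dict String Int :=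
  if d.contains item then d.insert item (d.getD item 0 + 1) else d.insert item 1

def marketResearch (carts : List (List String)) : String × String :=
  let items := carts.foldl (fun d l => l.foldl marketResearchStep d) PySem.Dict.empty
  let s := PySem.List.sorted items.items (fun x => x.2) true
  match PySem.List.pyGet? s 0 with
  | none => ("", "")  -- s[0] raises IndexError: excluded by Pre_
  | some p =>
    let mostCommon := p.1
    let items2 := carts.foldl
      (fun d l => if l.contains mostCommon then l.foldl marketResearchStep d else d)
      PySem.Dict.empty
    let s2 := PySem.List.sorted items2.items (fun x => x.2) true
    match PySem.List.pyGet? s2 1 with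
    | none => (mostCommon, "")  -- s2[1] raises IndexError: excluded by Pre_
    | some q => (mostCommon, q.1)

-- ===== PORT B =====
-- Source B's helper count(seq): one unconditional dict.get-based counting pass
def pvCount (xs : List String) : PySem.Dict String Int :=
  xs.foldl (fun d x => d.insert x (d.getD x 0 + 1)) PySem.Dict.empty

-- Source B's top-2 loop body over c2.items()
def pvTop2Step (p : Option (String × Int) × Option (String × Int)) (kv : String × Int) :
    Option (String × Int) × Option (String × Int) :=
  match p.1 with
  | none => (some kv, p.2)
  | some b =>
    if b.2 < kv.2 then (some kv, some b)
    else match p.2 with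
      | none => (p.1, some kv)
      | some s => if s.2 < kv.2 then (p.1, some kv) else p

def marketResearch_alt (carts : List (List String)) : String × String :=
  let c1 := pvCount carts.flatten
  match PySem.List.max? c1.keys (fun k => c1.getD k 0) with  -- max() raises on empty: excluded by Pre_
  | none => ("", "")
  | some most =>
    let c2 := pvCount ((carts.filter (fun l => l.contains most)).flatten)
    let bs := c2.items.foldl pvTop2Step (none, none)
    (most, (bs.2.map (fun kv => kv.1)).getD "")  -- second[0] raises if second is None: excluded by Pre_

-- ===== PRECONDITION & SPEC =====
-- first key (in first-occurrence order) of the flattened carts attaining the maximal count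
def pvMode (xs : List String) : String :=
  ((PySem.List.dedup xs).filter
    (fun k => (PySem.List.dedup xs).all (fun j => xs.count j ≤ xs.count k))).headD ""

-- Pre_ excludes exactly the inputs where the Python A raises IndexError: carts with no items
-- at all (s[0] fails), and carts where no cart containing the most common item has a second
-- distinct item (s2[1] fails).
def Pre_marketResearch (carts : List (List String)) : Prop :=
  carts.flatten ≠ [] ∧
  ∃ l ∈ carts, pvMode carts.flatten ∈ l ∧ ∃ x ∈ l, x ≠ pvMode carts.flatten
instance (carts : List (List String)) : Decidable (Pre_marketResearch carts) := by
  unfold Pre_marketResearch; infer_instance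

def pvWitness_marketResearch : List (List String) := [["a", "b", "a"]]

def Spec_marketResearch (carts : List (List String)) (out : String × String) : Prop := out = marketResearch_alt carts
instance (carts : List (List String)) (out : String × String) : Decidable (Spec_marketResearch carts out) := by unfold Spec_marketResearch; infer_instance

-- ===== CLAIM (what is proved, stated in full; the proofs are below) =====
def Claim_equal_marketResearch : Prop := ∀ (carts : List (List String)), Dom_marketResearch carts → Pre_marketResearch carts → Spec_marketResearch carts (marketResearch carts)

-- ===== LEMMAS AND PROOFS =====

-- A's guarded counting step IS the unconditional insert-getD+1 step
theorem marketResearchStep_eq :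
    marketResearchStep = fun (d : PySem.Dict String Int) x => d.insert x (d.getD x 0 + 1) := by
  funext d x
  unfold marketResearchStep
  by_cases h : d.contains x
  · simp [h]
  · simp only [Bool.not_eq_true] at h
    simp [h, PySem.Dict.getD, (PySem.Dict.get?_eq_none_iff_contains d x).mpr h]

-- A's first dict equals counter of the flattened carts
theorem dict1_eq (carts : List (List String)) :
    carts.foldl (fun d l => l.foldl marketResearchStep d) PySem.Dict.empty
      = PySem.Dict.counter carts.flatten := by
  rw [← PySem.Dict.foldl_insert_getD_add_one_eq_counter, List.foldl_flatten, marketResearchStep_eq]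

-- A's second dict equals counter of the flatten of the filtered carts
theorem dict2_eq (carts : List (List String)) (mc : String) :
    carts.foldl (fun d l => if l.contains mc then l.foldl marketResearchStep d else d)
        PySem.Dict.empty
      = PySem.Dict.counter ((carts.filter (fun l => l.contains mc)).flatten) := by
  rw [← PySem.Dict.foldl_insert_getD_add_one_eq_counter, List.foldl_flatten, List.foldl_filter,
    marketResearchStep_eq]

-- the first two positions of an insertBy step are exactly Source B's top-2 update
theorem insertBy_pair (x : String × Int) (t : List (String × Int)) :
    ((PySem.List.insertBy (fun a b => decide (b.2 < a.2)) x t).head?,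
     (PySem.List.insertBy (fun a b => decide (b.2 < a.2)) x t)[1]?)
      = pvTop2Step (t.head?, t[1]?) x := by
  cases t with
  | nil => simp [PySem.List.insertBy, pvTop2Step]
  | cons y ys =>
    by_cases h : y.2 < x.2
    · simp [PySem.List.insertBy, h, pvTop2Step]
    · cases ys with
      | nil => simp [PySem.List.insertBy, h, pvTop2Step]
      | cons z zs =>
        by_cases h2 : z.2 < x.2 <;>
          simp [PySem.List.insertBy, h, h2, pvTop2Step]

-- the insertion-sort fold, projected to its first two positions, is Source B's top-2 fold
theorem foldl_insertBy_pair (l t : List (String × Int)) :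
    ((l.foldl (fun acc x => PySem.List.insertBy (fun a b => decide (b.2 < a.2)) x acc) t).head?,
     (l.foldl (fun acc x => PySem.List.insertBy (fun a b => decide (b.2 < a.2)) x acc) t)[1]?)
      = l.foldl pvTop2Step (t.head?, t[1]?) := by
  induction l generalizing t with
  | nil => rfl
  | cons x xs ih =>
    simp only [List.foldl_cons]
    rw [ih, insertBy_pair]

theorem sorted_rev_pair (l : List (String × Int)) :
    ((PySem.List.sorted l (fun x => x.2) true).head?,
     (PySem.List.sorted l (fun x => x.2) true)[1]?)
      = l.foldl pvTop2Step (none, none) := by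
  rw [PySem.List.sorted_rev_eq_foldl_insertBy]
  exact foldl_insertBy_pair l []

-- the first-max step (max? with key (·.2)), named so folds compare syntactically
def pvMaxStep (acc : Option (String × Int)) (x : String × Int) : Option (String × Int) :=
  match acc with
  | none => some x
  | some m => if m.2 < x.2 then some x else some m

-- the first-max step over keys, compared through f
def pvMaxStepF (f : String → String × Int) (acc : Option String) (x : String) : Option String :=
  match acc with
  | none => some x
  | some m => if (f m).2 < (f x).2 then some x else some m

theorem max?_pair_eq (l : List (String × Int)) :
    PySem.List.max? l (fun x => x.2) = l.foldl pvMaxStep none := by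
  unfold PySem.List.max? pvMaxStep
  congr 1
  funext acc x
  cases acc with
  | none => rfl
  | some m => dsimp only

theorem max?_f_eq (xs : List String) (f : String → String × Int) :
    PySem.List.max? xs (fun k => (f k).2) = xs.foldl (pvMaxStepF f) none := by
  unfold PySem.List.max? pvMaxStepF
  congr 1
  funext acc x
  cases acc with
  | none => rfl
  | some m => dsimp only

-- first component of the top-2 fold is the first-max fold (max?)
theorem foldl_top2_fst (l : List (String × Int)) (p : Option (String × Int) × Option (String × Int)) :
    (l.foldl pvTop2Step p).1 = l.foldl pvMaxStep p.1 := by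
  induction l generalizing p with
  | nil => rfl
  | cons x xs ih =>
    simp only [List.foldl_cons]
    rw [ih]
    congr 1
    rcases p with ⟨b, s⟩
    cases b with
    | none => rfl
    | some m =>
      by_cases h : m.2 < x.2
      · simp [pvTop2Step, pvMaxStep, h]
      · cases s with
        | none => simp [pvTop2Step, pvMaxStep, h]
        | some sec => by_cases h2 : sec.2 < x.2 <;> simp [pvTop2Step, pvMaxStep, h, h2]

theorem sorted_rev_head?_eq_max? (l : List (String × Int)) :
    (PySem.List.sorted l (fun x => x.2) true).head? = PySem.List.max? l (fun x => x.2) := by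
  have h := congrArg Prod.fst (sorted_rev_pair l)
  simp only at h
  rw [max?_pair_eq, h, foldl_top2_fst]

-- max? over a mapped list
theorem max?_map_aux (xs : List String) (f : String → String × Int) (a : Option String) :
    xs.foldl (fun x y => pvMaxStep x (f y)) (a.map f) = (xs.foldl (pvMaxStepF f) a).map f := by
  induction xs generalizing a with
  | nil => rfl
  | cons x t ih =>
    simp only [List.foldl_cons]
    cases a with
    | none => exact ih (some x)
    | some m =>
      by_cases h : (f m).2 < (f x).2
      · rw [show pvMaxStep (Option.map f (some m)) (f x) = some (f x) by
          simp [pvMaxStep, h], show pvMaxStepF f (some m) x = some x by simp [pvMaxStepF, h]]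
        exact ih (some x)
      · rw [show pvMaxStep (Option.map f (some m)) (f x) = some (f m) by
          simp [pvMaxStep, h], show pvMaxStepF f (some m) x = some m by simp [pvMaxStepF, h]]
        exact ih (some m)

theorem max?_map (xs : List String) (f : String → String × Int) :
    PySem.List.max? (xs.map f) (fun x => x.2)
      = (PySem.List.max? xs (fun k => (f k).2)).map f := by
  rw [max?_pair_eq, max?_f_eq, List.foldl_map]
  exact max?_map_aux xs f none

-- pyGet? at the literal indices 0 and 1 is getElem?
theorem pyGet?_zero (l : List (String × Int)) : PySem.List.pyGet? l 0 = l.head? := by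
  cases l <;> simp [PySem.List.pyGet?, PySem.List.pyIdx?]

theorem pyGet?_one (l : List (String × Int)) : PySem.List.pyGet? l 1 = l[1]? := by
  rcases l with _ | ⟨a, _ | ⟨b, t⟩⟩ <;>
    simp [PySem.List.pyGet?, PySem.List.pyIdx?]

-- the two ports agree on EVERY input (on raising inputs both Lean ports return the same defaults)
theorem marketResearch_eq (carts : List (List String)) :
    marketResearch carts = marketResearch_alt carts := by
  unfold marketResearch marketResearch_alt pvCount
  dsimp only
  rw [PySem.Dict.foldl_insert_getD_add_one_eq_counter, dict1_eq]
  have hkey : (fun k => (PySem.Dict.counter carts.flatten).getD k 0)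
      = fun k => ((carts.flatten.count k : Int)) := by
    funext k; exact PySem.Dict.getD_counter carts.flatten k
  rw [PySem.Dict.keys_counter, hkey, pyGet?_zero, PySem.Dict.items_counter,
    sorted_rev_head?_eq_max?, max?_map]
  cases hm : PySem.List.max? (PySem.Set.ofList carts.flatten)
      (fun k => ((carts.flatten.count k : Int))) with
  | none => rfl
  | some most =>
    simp only [Option.map_some]
    rw [PySem.Dict.foldl_insert_getD_add_one_eq_counter, dict2_eq]
    have hpair := sorted_rev_pair
      (PySem.Dict.counter ((carts.filter (fun l => l.contains most)).flatten)).items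
    have h2 := congrArg Prod.snd hpair
    simp only at h2
    rw [pyGet?_one, h2]
    cases ((PySem.Dict.counter ((carts.filter (fun l => l.contains most)).flatten)).items.foldl
        pvTop2Step (none, none)).2 <;> rfl

-- ===== VERDICT (by name: the statement is the Claim_ definition above) =====
theorem marketResearch_spec : Claim_equal_marketResearch := by
  intro carts _ _
  unfold Spec_marketResearch
  exact marketResearch_eq carts
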